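-- pv_equiv track=rewrite | github.com/haolunc/ARC-RL | reference_solutions/solutions/b94a9452.py | transform
-- ===== SOURCE A (Python) =====
-- def transform(grid):
--
--     if not grid:
--         return []
--
--     rows = len(grid)
--     cols = len(grid[0])
--
--     non_zero = [(r, c) for r in range(rows) for c in range(cols) if grid[r][c] != 0]
--
--     if not non_zero:
--         return []
--
--     min_r = min(r for r, _ in non_zero)
--     max_r = max(r for r, _ in non_zero)
--     min_c = min(c for _, c in non_zero)
--     max_c = max(c for _, c in non_zero)
--
--     colours = {grid[r][c] for r, c in non_zero}
--
--     c1, c2 = tuple(colours)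
--
--     swap = {c1: c2, c2: c1}
--
--     out = []
--     for r in range(min_r, max_r + 1):
--         out_row = []
--         for c in range(min_c, max_c + 1):
--             val = grid[r][c]
--             out_row.append(swap.get(val, val))
--         out.append(out_row)
--
--     return out
-- ===== SOURCE B (Python) =====
-- # End-trimming re-implementation: drop all-zero rows from both ends (via reversal),
-- # shave the common leading/trailing zero margin off every row, swap by arithmetic
-- # (c1 + c2 - v) instead of enumerating coordinates with min/max and a dict.
-- def _lead(row):
--     n = 0
--     for v in row:
--         if v != 0:
--             break
--         n += 1
--     return n
--
--
-- def _trim_front(rows):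
--     while rows and _lead(rows[0]) == len(rows[0]):
--         rows = rows[1:]
--     return rows
--
--
-- def transform(grid):
--     rows = _trim_front(_trim_front(grid[::-1])[::-1])
--     if not rows:
--         return []
--     left = min(_lead(r) for r in rows)
--     right = min(_lead(r[::-1]) for r in rows)
--     colours = set()
--     for r in rows:
--         for v in r:
--             if v != 0:
--                 colours.add(v)
--     c1, c2 = tuple(colours)
--     return [[c1 + c2 - v if v == c1 or v == c2 else v
--              for v in r[left:len(r) - right]] for r in rows]
-- ===== Notes on version B (the rewrite author's own statement) =====
-- stated objective: alternative
-- what changed: B never builds the nonzero-coordinate list or its four min/max passes: it trims all-zero rows off both ends of the (reversed) grid, shaves each row by the minimum leading/trailing zero margin over the kept rows, and swaps the two colours arithmetically as c1+c2-v instead of a swap dict.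
-- outside the precondition, e.g. on transform([[1], [2, 3]]): A returns [[2], [1]], B raises ValueError
import Mathlib
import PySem

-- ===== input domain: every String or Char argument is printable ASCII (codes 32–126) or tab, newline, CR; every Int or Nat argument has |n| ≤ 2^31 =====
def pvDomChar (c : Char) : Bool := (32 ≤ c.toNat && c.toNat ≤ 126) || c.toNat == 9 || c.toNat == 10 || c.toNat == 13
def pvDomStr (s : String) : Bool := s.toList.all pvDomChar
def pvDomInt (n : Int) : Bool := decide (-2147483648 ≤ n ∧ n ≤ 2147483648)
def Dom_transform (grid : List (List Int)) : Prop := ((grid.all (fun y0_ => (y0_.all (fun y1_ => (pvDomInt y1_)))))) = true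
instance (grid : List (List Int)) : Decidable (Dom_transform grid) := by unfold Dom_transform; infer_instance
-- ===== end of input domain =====

-- B re-implements the crop-and-swap by trimming all-zero rows off both ends (via reversal),
-- shaving the common leading/trailing zero margin off every remaining row, and swapping the
-- two colours arithmetically (c1 + c2 - v); A enumerates all nonzero coordinates, takes four
-- min/max passes and a swap dict. Equivalence is proved on rectangular two-colour grids.

-- ===== PORT A =====
-- non_zero = [(r, c) for r in range(rows) for c in range(cols) if grid[r][c] != 0]
def pyA_nonZero (grid : List (List Int)) : List (Int × Int) :=
  (PySem.List.pyRange 0 (grid.length : Int) 1).flatMap (fun r =>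
    ((PySem.List.pyRange 0 ((PySem.List.pyGetD grid 0 []).length : Int) 1).filter
        (fun c => PySem.List.pyGetD (PySem.List.pyGetD grid r []) c 0 != 0)).map
      (fun c => (r, c)))

-- swap = {c1: c2, c2: c1};  swap.get(val, val)
def pyA_swapGet (c1 c2 v : Int) : Int :=
  PySem.Dict.getD ((PySem.Dict.empty.insert c1 c2).insert c2 c1) v v

def transform (grid : List (List Int)) : List (List Int) :=
  if grid = [] then []
  else
    let non_zero := pyA_nonZero grid
    if non_zero = [] then []
    else
      let min_r := (PySem.List.min? (non_zero.map Prod.fst) (fun x => x)).getD 0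
      let max_r := (PySem.List.max? (non_zero.map Prod.fst) (fun x => x)).getD 0
      let min_c := (PySem.List.min? (non_zero.map Prod.snd) (fun x => x)).getD 0
      let max_c := (PySem.List.max? (non_zero.map Prod.snd) (fun x => x)).getD 0
      let colours : PySem.Set Int :=
        PySem.Set.ofList (non_zero.map (fun p =>
          PySem.List.pyGetD (PySem.List.pyGetD grid p.1 []) p.2 0))
      match colours with
      | [c1, c2] =>
        (PySem.List.pyRange min_r (max_r + 1) 1).map (fun r =>
          (PySem.List.pyRange min_c (max_c + 1) 1).map (fun c =>
            pyA_swapGet c1 c2 (PySem.List.pyGetD (PySem.List.pyGetD grid r []) c 0)))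
      | _ => []   -- Python: ValueError from `c1, c2 = tuple(colours)`; excluded by Pre_transform

-- ===== PORT B =====
-- _lead(row): count of leading zeros (the for-loop with break)
def leadZeros : List Int → Nat
  | [] => 0
  | v :: t => if v != 0 then 0 else leadZeros t + 1

-- _trim_front(rows): while rows and _lead(rows[0]) == len(rows[0]): rows = rows[1:]
def trimFront : List (List Int) → List (List Int)
  | [] => []
  | r :: t => if leadZeros r = r.length then trimFront t else r :: t

def transform_alt (grid : List (List Int)) : List (List Int) :=
  -- rows = _trim_front(_trim_front(grid[::-1])[::-1])   (grid[::-1] is reverse)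
  let rows := trimFront (trimFront grid.reverse).reverse
  if rows = [] then []
  else
    let left := (PySem.List.min? (rows.map leadZeros) (fun x => x)).getD 0
    let right := (PySem.List.min? (rows.map (fun r => leadZeros r.reverse)) (fun x => x)).getD 0
    -- colours accumulated in one scan over the trimmed rows
    let colours : PySem.Set Int :=
      rows.foldl (fun s r => r.foldl (fun s v => if v != 0 then PySem.Set.add s v else s) s)
        PySem.Set.empty
    -- c1, c2 = tuple(colours): arity check + extraction (ValueError otherwise, excluded by Pre_)
    if colours.length = 2 then
      let c1 := colours.getD 0 0
      let c2 := colours.getD 1 0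
      rows.map (fun r =>
        (PySem.List.slice r (some (left : Int)) (some ((r.length : Int) - (right : Int)))).map
          (fun v => if v == c1 || v == c2 then c1 + c2 - v else v))
    else []

-- ===== PRECONDITION & SPEC =====
-- Pre_ excludes (a) ragged grids — A indexes every row up to the FIRST row's width, raising
-- IndexError on shorter rows and silently ignoring cells beyond that width on longer rows,
-- an accident of its implementation on which B raises ValueError or scans the full rows — and
-- (b) grids whose number of distinct nonzero values is not 0 or 2, on which A raises ValueError.
def Pre_transform (grid : List (List Int)) : Prop :=
  (∀ row ∈ grid, row.length = (grid.headD []).length) ∧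
  ((PySem.Set.ofList (grid.flatten.filter (fun v => v != 0))).length = 0 ∨
   (PySem.Set.ofList (grid.flatten.filter (fun v => v != 0))).length = 2)
instance (grid : List (List Int)) : Decidable (Pre_transform grid) := by
  unfold Pre_transform; infer_instance

def pvWitness_transform : List (List Int) := [[0, 1], [2, 0]]

def Spec_transform (grid : List (List Int)) (out : List (List Int)) : Prop := out = transform_alt grid
instance (grid : List (List Int)) (out : List (List Int)) : Decidable (Spec_transform grid out) := by unfold Spec_transform; infer_instance

-- ===== CLAIM (what is proved, stated in full; the proofs are below) =====
def Claim_equal_transform : Prop := ∀ (grid : List (List Int)), Dom_transform grid → Pre_transform grid → Spec_transform grid (transform grid)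

-- ===== LEMMAS AND PROOFS =====

-- rows with a nonzero cell / columns with a nonzero cell (proof-side characterisations)
def nzRows (grid : List (List Int)) : List Nat :=
  (List.range grid.length).filter (fun r => (grid.getD r []).any (fun v => v != 0))

def nzCols (grid : List (List Int)) : List Nat :=
  (List.range (grid.headD []).length).filter (fun c => grid.any (fun row => row.getD c 0 != 0))

-- the zero-row test used by trimFront, as a Bool predicate
def zrow (r : List Int) : Bool := decide (leadZeros r = r.length)

lemma pyGetD_zero_headD (grid : List (List Int)) :
    PySem.List.pyGetD grid 0 [] = grid.headD [] := by
  cases grid <;> simp [PySem.List.pyGetD, PySem.List.pyGet?, PySem.List.pyIdx?]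

lemma map_getD_range_self {α : Type} (xs : List α) (d : α) :
    (List.range xs.length).map (fun i => xs.getD i d) = xs := by
  apply List.ext_getElem
  · simp
  · intro i h1 h2
    simp [List.getD_eq_getElem?_getD, List.getElem?_eq_getElem h2]

lemma rowproj (row : List Int) (p : Int → Bool) :
    ((List.range row.length).filter (fun c => p (row.getD c 0))).map (fun c => row.getD c 0)
      = row.filter p := by
  have h := List.filter_map (f := fun i => row.getD i 0) (p := p) (l := List.range row.length)
  rw [map_getD_range_self] at h
  simpa using h.symm

lemma nonZero_eq (grid : List (List Int)) :
    pyA_nonZero grid =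
      (List.range grid.length).flatMap (fun r =>
        (((List.range (grid.headD []).length).filter
            (fun c => (grid.getD r []).getD c 0 != 0)).map (fun c : Nat => ((r : Int), (c : Int))))) := by
  unfold pyA_nonZero
  rw [pyGetD_zero_headD, PySem.List.pyRange_zero_nat, PySem.List.pyRange_zero_nat]
  rw [List.flatMap_map]
  congr 1
  funext r
  rw [List.filter_map, List.map_map]
  simp [Function.comp_def, PySem.List.pyGetD_natCast]

lemma mem_nzRows (grid : List (List Int)) (r : Nat) :
    r ∈ nzRows grid ↔ r < grid.length ∧ ∃ v ∈ grid.getD r [], v ≠ 0 := by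
  simp [nzRows, List.mem_filter, List.mem_range, List.any_eq_true]

lemma mem_nzCols (grid : List (List Int)) (c : Nat) :
    c ∈ nzCols grid ↔ c < (grid.headD []).length ∧ ∃ row ∈ grid, row.getD c 0 ≠ 0 := by
  simp [nzCols, List.mem_filter, List.mem_range, List.any_eq_true]

lemma mem_nonZero (grid : List (List Int)) (x : Int × Int) :
    x ∈ pyA_nonZero grid ↔ ∃ r c : Nat, x = ((r : Int), (c : Int)) ∧ r < grid.length ∧
      c < (grid.headD []).length ∧ (grid.getD r []).getD c 0 ≠ 0 := by
  rw [nonZero_eq]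
  simp only [List.mem_flatMap, List.mem_map, List.mem_filter, List.mem_range, bne_iff_ne, ne_eq]
  constructor
  · rintro ⟨r, hr, c, ⟨hc, hv⟩, hx⟩
    exact ⟨r, c, hx.symm, hr, hc, hv⟩
  · rintro ⟨r, c, hx, hr, hc, hv⟩
    exact ⟨r, hr, c, ⟨hc, hv⟩, hx.symm⟩

lemma pairwise_nzRows (grid : List (List Int)) : (nzRows grid).Pairwise (· < ·) :=
  List.pairwise_lt_range.sublist List.filter_sublist

lemma pairwise_nzCols (grid : List (List Int)) : (nzCols grid).Pairwise (· < ·) :=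
  List.pairwise_lt_range.sublist List.filter_sublist

lemma getLastD_mem (l : List Nat) : ∀ d, l ≠ [] → l.getLastD d ∈ l := by
  induction l with
  | nil => intro _ h; exact absurd rfl h
  | cons a t ih =>
    intro d _
    rw [List.getLastD_cons]
    cases t with
    | nil => simp
    | cons b t' => exact List.mem_cons_of_mem a (ih a (by simp))

lemma le_getLastD_of_pairwise (l : List Nat) : l.Pairwise (· < ·) →
    ∀ x ∈ l, ∀ d, x ≤ l.getLastD d := by
  induction l with
  | nil => intro _ x hx; cases hx
  | cons a t ih =>
    intro h x hx d
    rw [List.getLastD_cons]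
    cases t with
    | nil => simp at hx ⊢; omega
    | cons b t' =>
      rcases List.mem_cons.mp hx with rfl | hxt
      · have hm := getLastD_mem (b :: t') x (by simp)
        have := List.rel_of_pairwise_cons h hm
        omega
      · exact ih h.of_cons x hxt a

lemma headD_le_of_pairwise (l : List Nat) (hl : l.Pairwise (· < ·)) :
    ∀ x ∈ l, ∀ d, l.headD d ≤ x := by
  cases l with
  | nil => intro x hx; cases hx
  | cons a t =>
    intro x hx d
    rcases List.mem_cons.mp hx with rfl | hxt
    · simp
    · have := List.rel_of_pairwise_cons hl hxt
      simp; omega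

lemma headD_eq_of_min (l : List Nat) (hl : l.Pairwise (· < ·)) (x : Nat)
    (hx : x ∈ l) (hmin : ∀ y ∈ l, x ≤ y) (d : Nat) : l.headD d = x := by
  cases l with
  | nil => cases hx
  | cons a t =>
    have h1 := hmin a List.mem_cons_self
    have h2 := headD_le_of_pairwise _ hl x hx d
    simp at h2 ⊢
    omega

lemma min_eq_headD (l : List Nat) (L : List Int) (hl : l.Pairwise (· < ·))
    (hmem : ∀ x ∈ L, ∃ r : Nat, x = (r : Int) ∧ r ∈ l)
    (hcov : ∀ r ∈ l, ((r : Int)) ∈ L) (hne : L ≠ []) :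
    (PySem.List.min? L (fun x => x)).getD 0 = ((l.headD 0 : Nat) : Int) := by
  cases hmin : PySem.List.min? L (fun x => x) with
  | none => exact absurd ((PySem.List.min?_eq_none_iff (xs := L) (key := fun x => x)).mp hmin) hne
  | some m =>
    obtain ⟨r, rfl, hrl⟩ := hmem m (PySem.List.min?_mem hmin)
    cases l with
    | nil => cases hrl
    | cons a t =>
      have h1 : (r : Int) ≤ (a : Int) := PySem.List.min?_isMin hmin _ (hcov a List.mem_cons_self)
      have h2 : a ≤ r := by
        rcases List.mem_cons.mp hrl with rfl | hrt
        · exact le_refl _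
        · exact le_of_lt (List.rel_of_pairwise_cons hl hrt)
      have : a = r := by omega
      simp [this]

lemma max_eq_getLastD (l : List Nat) (L : List Int) (hl : l.Pairwise (· < ·))
    (hmem : ∀ x ∈ L, ∃ r : Nat, x = (r : Int) ∧ r ∈ l)
    (hcov : ∀ r ∈ l, ((r : Int)) ∈ L) (hne : L ≠ []) :
    (PySem.List.max? L (fun x => x)).getD 0 = ((l.getLastD 0 : Nat) : Int) := by
  cases hmax : PySem.List.max? L (fun x => x) with
  | none => exact absurd ((PySem.List.max?_eq_none_iff (xs := L) (key := fun x => x)).mp hmax) hne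
  | some m =>
    obtain ⟨r, rfl, hrl⟩ := hmem m (PySem.List.max?_mem hmax)
    have hlne : l ≠ [] := List.ne_nil_of_mem hrl
    have h1 : (l.getLastD 0 : Int) ≤ (r : Int) :=
      PySem.List.max?_isMax hmax _ (hcov _ (getLastD_mem l 0 hlne))
    have h2 : r ≤ l.getLastD 0 := le_getLastD_of_pairwise l hl r hrl 0
    have : l.getLastD 0 = r := by omega
    simp only [Option.getD_some]
    exact_mod_cast this.symm

-- ---- leadZeros characterisation ----
lemma leadZeros_cons (v : Int) (t : List Int) :
    leadZeros (v :: t) = if v = 0 then leadZeros t + 1 else 0 := by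
  simp only [leadZeros, bne_iff_ne, ne_eq, ite_not]

lemma leadZeros_le (r : List Int) : leadZeros r ≤ r.length := by
  induction r with
  | nil => simp [leadZeros]
  | cons v t ih => rw [leadZeros_cons]; simp only [List.length_cons]; split <;> omega

lemma leadZeros_eq_length_iff (r : List Int) :
    leadZeros r = r.length ↔ ∀ v ∈ r, v = 0 := by
  induction r with
  | nil => simp [leadZeros]
  | cons v t ih =>
    rw [leadZeros_cons]
    simp only [List.length_cons, List.mem_cons]
    by_cases hv : v = 0
    · have := leadZeros_le t
      rw [if_pos hv]
      constructor
      · intro h x hx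
        rcases hx with rfl | hx
        · exact hv
        · exact ih.mp (by omega) x hx
      · intro h
        have := ih.mpr (fun x hx => h x (Or.inr hx))
        omega
    · rw [if_neg hv]
      constructor
      · omega
      · intro h; exact absurd (h v (Or.inl rfl)) hv

lemma leadZeros_getD_ne (r : List Int) (h : leadZeros r < r.length) :
    r.getD (leadZeros r) 0 ≠ 0 := by
  induction r with
  | nil => simp at h
  | cons v t ih =>
    rw [leadZeros_cons] at h ⊢
    by_cases hv : v = 0
    · rw [if_pos hv] at h ⊢
      simpa using ih (by simpa using h)
    · rw [if_neg hv]
      simpa using hv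

lemma leadZeros_getD_zero (r : List Int) : ∀ i, i < leadZeros r → r.getD i 0 = 0 := by
  induction r with
  | nil => simp [leadZeros]
  | cons v t ih =>
    intro i hi
    rw [leadZeros_cons] at hi
    by_cases hv : v = 0
    · rw [if_pos hv] at hi
      cases i with
      | zero => simpa using hv
      | succ j => simpa using ih j (by omega)
    · rw [if_neg hv] at hi; omega

lemma leadZeros_le_of_getD_ne (r : List Int) (i : Nat) (h : r.getD i 0 ≠ 0) :
    leadZeros r ≤ i := by
  by_contra hlt
  exact h (leadZeros_getD_zero r i (by omega))

lemma zrow_false_iff (r : List Int) : zrow r = false ↔ ∃ v ∈ r, v ≠ 0 := by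
  have h := leadZeros_eq_length_iff r
  simp only [zrow, decide_eq_false_iff_not]
  constructor
  · intro hn
    by_contra hc
    apply hn
    apply h.mpr
    intro v hv
    by_contra hv0
    exact hc ⟨v, hv, hv0⟩
  · rintro ⟨v, hv, hv0⟩ he
    exact hv0 (h.mp he v hv)

lemma trimFront_eq_dropWhile (l : List (List Int)) : trimFront l = l.dropWhile zrow := by
  induction l with
  | nil => rfl
  | cons r t ih =>
    by_cases h : leadZeros r = r.length
    · rw [trimFront, if_pos h, List.dropWhile_cons_of_pos (by simp [zrow, h]), ih]
    · rw [trimFront, if_neg h, List.dropWhile_cons_of_neg (by simp [zrow, h])]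

lemma dropWhile_eq_drop {α : Type} (p : α → Bool) (l : List α) :
    l.dropWhile p = l.drop (l.takeWhile p).length := by
  have h := List.takeWhile_append_dropWhile (p := p) (l := l)
  calc l.dropWhile p
      = (l.takeWhile p ++ l.dropWhile p).drop (l.takeWhile p).length :=
        List.drop_left.symm
    _ = l.drop (l.takeWhile p).length := by rw [h]

lemma takeWhile_length_eq {α : Type} (p : α → Bool) (d : α) (l : List α) (k : Nat)
    (hk : k < l.length) (h1 : ∀ i, i < k → p (l.getD i d) = true)
    (h2 : p (l.getD k d) = false) : (l.takeWhile p).length = k := by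
  induction l generalizing k with
  | nil => simp at hk
  | cons x t ih =>
    cases k with
    | zero =>
      simp only [List.getD_cons_zero] at h2
      simp [List.takeWhile_cons, h2]
    | succ j =>
      have hx : p x = true := by simpa using h1 0 (by omega)
      rw [List.takeWhile_cons_of_pos hx]
      simp only [List.length_cons]
      rw [ih j (by simpa using hk) (fun i hi => by simpa using h1 (i + 1) (by omega))
        (by simpa using h2)]

-- the trimmed rows, index bounds, as drop/take of grid
lemma rows_eq_crop (grid : List (List Int))
    (hne : nzRows grid ≠ []) :
    trimFront (trimFront grid.reverse).reverse =
      (grid.drop ((nzRows grid).headD 0)).take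
        ((nzRows grid).getLastD 0 + 1 - (nzRows grid).headD 0) := by
  have hA : (nzRows grid).headD 0 ∈ nzRows grid := by
    cases h : nzRows grid with
    | nil => exact absurd h hne
    | cons a t => simp [h]
  have hB : (nzRows grid).getLastD 0 ∈ nzRows grid := getLastD_mem _ _ hne
  set A := (nzRows grid).headD 0 with hAdef
  set B := (nzRows grid).getLastD 0 with hBdef
  have hAmin : ∀ y ∈ nzRows grid, A ≤ y := fun y hy =>
    headD_le_of_pairwise _ (pairwise_nzRows grid) y hy 0
  have hBmax : ∀ y ∈ nzRows grid, y ≤ B := fun y hy =>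
    le_getLastD_of_pairwise _ (pairwise_nzRows grid) y hy 0
  have hAB : A ≤ B := hBmax A hA
  have hBlen : B < grid.length := ((mem_nzRows grid B).mp hB).1
  -- zrow of a row by its index
  have hz : ∀ i, i < grid.length → (zrow (grid.getD i []) = false ↔ i ∈ nzRows grid) := by
    intro i hi
    rw [zrow_false_iff, mem_nzRows]
    constructor
    · intro h; exact ⟨hi, h⟩
    · rintro ⟨_, h⟩; exact h
  have hzlt : ∀ i, i < grid.length → i ∉ nzRows grid → zrow (grid.getD i []) = true := by
    intro i hi hni
    by_contra hc
    exact hni ((hz i hi).mp (by simpa using hc))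
  -- step 1: grid.reverse trimmed = reverse of grid.take (B+1)
  have ht : (grid.reverse.takeWhile zrow).length = grid.length - 1 - B := by
    apply takeWhile_length_eq zrow []
    · simpa using (by omega : grid.length - 1 - B < grid.length)
    · intro i hi
      have hlt : grid.length - 1 - i < grid.length := by omega
      have : grid.reverse.getD i [] = grid.getD (grid.length - 1 - i) [] := by
        rw [List.getD_eq_getElem _ _ (by simpa using by omega : i < grid.reverse.length),
          List.getElem_reverse, List.getD_eq_getElem _ _ hlt]
      rw [this]
      apply hzlt _ hlt
      intro hmem
      exact absurd (hBmax _ hmem) (by omega)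
    · have : grid.reverse.getD (grid.length - 1 - B) [] = grid.getD B [] := by
        rw [List.getD_eq_getElem _ _ (by simpa using by omega :
              grid.length - 1 - B < grid.reverse.length),
          List.getElem_reverse, List.getD_eq_getElem _ _ (by omega)]
        congr 1
        omega
      rw [this]
      exact (hz B hBlen).mpr hB
  have hstep1 : (trimFront grid.reverse).reverse = grid.take (B + 1) := by
    rw [trimFront_eq_dropWhile, dropWhile_eq_drop, ht, List.reverse_drop, List.reverse_reverse,
      List.length_reverse]
    congr 1
    omega
  rw [hstep1, trimFront_eq_dropWhile, dropWhile_eq_drop]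
  have hlen' : (grid.take (B + 1)).length = B + 1 := by
    rw [List.length_take]; omega
  have ha : ((grid.take (B + 1)).takeWhile zrow).length = A := by
    apply takeWhile_length_eq zrow []
    · omega
    · intro i hi
      have hilen : i < B + 1 := by omega
      have : (grid.take (B + 1)).getD i [] = grid.getD i [] := by
        rw [List.getD_eq_getElem _ _ (by omega), List.getElem_take,
          List.getD_eq_getElem _ _ (by omega)]
      rw [this]
      apply hzlt _ (by omega)
      intro hmem
      exact absurd (hAmin _ hmem) (by omega)
    · have : (grid.take (B + 1)).getD A [] = grid.getD A [] := by
        rw [List.getD_eq_getElem _ _ (by omega), List.getElem_take,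
          List.getD_eq_getElem _ _ (by omega)]
      rw [this]
      exact (hz A (by omega)).mpr hA
  rw [ha, List.drop_take]

-- rows = [] ↔ no nonzero row
lemma rows_nil_iff (grid : List (List Int)) :
    trimFront (trimFront grid.reverse).reverse = [] ↔ nzRows grid = [] := by
  rw [trimFront_eq_dropWhile, trimFront_eq_dropWhile]
  constructor
  · intro h
    rw [List.eq_nil_iff_forall_not_mem]
    intro r hr
    obtain ⟨hrlen, v, hv, hv0⟩ := (mem_nzRows grid r).mp hr
    have hrow : grid.getD r [] ∈ grid := by
      rw [List.getD_eq_getElem _ _ hrlen]; exact List.getElem_mem _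
    have hzr : zrow (grid.getD r []) = false := (zrow_false_iff _).mpr ⟨v, hv, hv0⟩
    -- every row of grid satisfies zrow
    have hall : ∀ x ∈ grid, zrow x = true := by
      intro x hx
      have hx' : x ∈ grid.reverse := by simpa using hx
      rcases (List.mem_append.mp (by
          rw [List.takeWhile_append_dropWhile (p := zrow) (l := grid.reverse)]; exact hx')) with
        h1 | h2
      · exact List.mem_takeWhile_imp h1
      · have : x ∈ (grid.reverse.dropWhile zrow).reverse := by simpa using h2
        rcases (List.mem_append.mp (by
            rw [List.takeWhile_append_dropWhile (p := zrow)
              (l := (grid.reverse.dropWhile zrow).reverse)]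
            exact this)) with h3 | h4
        · exact List.mem_takeWhile_imp h3
        · rw [h] at h4; cases h4
    rw [hall _ hrow] at hzr
    cases hzr
  · intro h
    rw [List.dropWhile_eq_nil_iff]
    intro x hx
    have hx' : x ∈ grid := List.mem_reverse.mp
      (List.Sublist.mem (List.mem_reverse.mp hx) (List.dropWhile_sublist _))
    by_contra hc
    have hzf : zrow x = false := by simpa using hc
    obtain ⟨v, hv, hv0⟩ := (zrow_false_iff x).mp hzf
    obtain ⟨r, hr, rfl⟩ := List.mem_iff_getElem.mp hx'
    have : r ∈ nzRows grid := (mem_nzRows grid r).mpr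
      ⟨hr, v, by rwa [List.getD_eq_getElem _ _ hr], hv0⟩
    rw [h] at this
    cases this

-- ---- crop membership ----
lemma crop_length (grid : List (List Int)) (A B : Nat) (hB : B < grid.length) :
    ((grid.drop A).take (B + 1 - A)).length = B + 1 - A := by
  rw [List.length_take, List.length_drop]; omega

lemma crop_getD (grid : List (List Int)) (A B j : Nat) (hB : B < grid.length)
    (hj : j < B + 1 - A) :
    ((grid.drop A).take (B + 1 - A)).getD j [] = grid.getD (A + j) [] := by
  rw [List.getD_eq_getElem _ _ (by rw [crop_length grid A B hB]; omega),
    List.getElem_take, List.getElem_drop, List.getD_eq_getElem _ _ (by omega)]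

lemma crop_mem_grid (grid : List (List Int)) (A B : Nat) (r : List Int)
    (h : r ∈ (grid.drop A).take (B + 1 - A)) : r ∈ grid :=
  List.mem_of_mem_drop (List.mem_of_mem_take h)

lemma mem_crop_of_nzRow (grid : List (List Int)) (hne : nzRows grid ≠ []) (i : Nat)
    (hi : i ∈ nzRows grid) :
    grid.getD i [] ∈ (grid.drop ((nzRows grid).headD 0)).take
      ((nzRows grid).getLastD 0 + 1 - (nzRows grid).headD 0) := by
  set A := (nzRows grid).headD 0
  set B := (nzRows grid).getLastD 0
  have hAle : A ≤ i := headD_le_of_pairwise _ (pairwise_nzRows grid) i hi 0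
  have hiB : i ≤ B := le_getLastD_of_pairwise _ (pairwise_nzRows grid) i hi 0
  have hB : B < grid.length :=
    ((mem_nzRows grid B).mp (getLastD_mem _ _ hne)).1
  have key := crop_getD grid A B (i - A) hB (by omega)
  rw [(by omega : A + (i - A) = i)] at key
  rw [← key]
  have hlt : i - A < ((grid.drop A).take (B + 1 - A)).length := by
    rw [crop_length grid A B hB]; omega
  rw [List.getD_eq_getElem _ _ hlt]
  exact List.getElem_mem _

-- the crop keeps exactly the nonzero content of the grid
lemma zero_block_filter (L : List (List Int)) (h : ∀ r ∈ L, ∀ v ∈ r, v = 0) :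
    L.flatten.filter (fun v => v != 0) = [] := by
  rw [List.filter_eq_nil_iff]
  intro x hx
  obtain ⟨r, hr, hxr⟩ := List.mem_flatten.mp hx
  simpa using h r hr x hxr

lemma filter_flatten_crop (grid : List (List Int)) (hne : nzRows grid ≠ []) :
    ((grid.drop ((nzRows grid).headD 0)).take
        ((nzRows grid).getLastD 0 + 1 - (nzRows grid).headD 0)).flatten.filter
      (fun v => v != 0) = grid.flatten.filter (fun v => v != 0) := by
  set A := (nzRows grid).headD 0 with hAdef
  set B := (nzRows grid).getLastD 0 with hBdef
  have hB : B < grid.length := ((mem_nzRows grid B).mp (getLastD_mem _ _ hne)).1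
  have hAB : A ≤ B := headD_le_of_pairwise _ (pairwise_nzRows grid) B (getLastD_mem _ _ hne) 0
  have hzero : ∀ i, i < grid.length → i ∉ nzRows grid → ∀ v ∈ grid.getD i [], v = 0 := by
    intro i hi hni v hv
    by_contra hv0
    exact hni ((mem_nzRows grid i).mpr ⟨hi, v, hv, hv0⟩)
  have hsplit : grid = grid.take A ++ ((grid.drop A).take (B + 1 - A) ++ grid.drop (B + 1)) := by
    have hdd : (grid.drop A).drop (B + 1 - A) = grid.drop (B + 1) := by
      rw [List.drop_drop]
      congr 1
      omega
    rw [← hdd, List.take_append_drop, List.take_append_drop]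
  conv_rhs => rw [hsplit]
  rw [List.flatten_append, List.flatten_append, List.filter_append, List.filter_append]
  have h1 : (grid.take A).flatten.filter (fun v => v != 0) = [] := by
    apply zero_block_filter
    intro r hr
    obtain ⟨i, hi, rfl⟩ := List.mem_iff_getElem.mp hr
    have hiA : i < A := by
      have := hi; rw [List.length_take] at this; omega
    rw [List.getElem_take]
    have hilen : i < grid.length := by
      have := hi; rw [List.length_take] at this; omega
    rw [← List.getD_eq_getElem grid [] hilen]
    apply hzero i hilen
    intro hmem
    exact absurd (headD_le_of_pairwise _ (pairwise_nzRows grid) i hmem 0) (by omega)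
  have h2 : (grid.drop (B + 1)).flatten.filter (fun v => v != 0) = [] := by
    apply zero_block_filter
    intro r hr
    obtain ⟨i, hi, rfl⟩ := List.mem_iff_getElem.mp hr
    rw [List.getElem_drop]
    have hilen : B + 1 + i < grid.length := by
      have := hi; rw [List.length_drop] at this; omega
    rw [← List.getD_eq_getElem grid [] hilen]
    apply hzero _ hilen
    intro hmem
    exact absurd (le_getLastD_of_pairwise _ (pairwise_nzRows grid) _ hmem 0) (by omega)
  rw [h1, h2, List.nil_append, List.append_nil]

-- B's colour scan builds the set of nonzero values in row-major order
lemma scanColours_eq (L : List (List Int)) :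
    L.foldl (fun s r => r.foldl (fun s v => if v != 0 then PySem.Set.add s v else s) s)
      PySem.Set.empty = PySem.Set.ofList (L.flatten.filter (fun v => v != 0)) := by
  simp only [PySem.List.foldl_if_eq_foldl_filter]
  rw [PySem.Set.ofList_eq_foldl, List.filter_flatten, List.foldl_flatten, List.foldl_map]
  rfl

-- A's colour list equals the row-major nonzero scan, on rectangular grids
lemma flatMap_congr_mem {α β : Type} (l : List α) (f g : α → List β)
    (h : ∀ x ∈ l, f x = g x) : l.flatMap f = l.flatMap g := by
  induction l with
  | nil => rfl
  | cons a t ih =>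
    simp only [List.flatMap_cons]
    rw [h a List.mem_cons_self, ih (fun x hx => h x (List.mem_cons_of_mem a hx))]

lemma flatMap_range_getD {α β : Type} (xs : List α) (d : α) (f : α → List β) :
    (List.range xs.length).flatMap (fun r => f (xs.getD r d)) = xs.flatMap f := by
  conv_rhs => rw [← map_getD_range_self xs d]
  rw [List.flatMap_map]

lemma coloursA_eq (grid : List (List Int))
    (hrect : ∀ row ∈ grid, row.length = (grid.headD []).length) :
    (pyA_nonZero grid).map (fun p => PySem.List.pyGetD (PySem.List.pyGetD grid p.1 []) p.2 0)
      = grid.flatten.filter (fun v => v != 0) := by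
  rw [nonZero_eq, List.map_flatMap]
  calc (List.range grid.length).flatMap _
      = (List.range grid.length).flatMap
          (fun r => (grid.getD r []).filter (fun v => v != 0)) := by
        apply flatMap_congr_mem
        intro r hr
        rw [List.mem_range] at hr
        have hrow : grid.getD r [] ∈ grid := by
          rw [List.getD_eq_getElem _ _ hr]; exact List.getElem_mem _
        rw [List.map_map]
        have hlen := hrect _ hrow
        rw [← hlen]
        simpa [Function.comp_def, PySem.List.pyGetD_natCast] using
          rowproj (grid.getD r []) (fun v => v != 0)
    _ = grid.flatMap (List.filter (fun v => v != 0)) := flatMap_range_getD grid [] _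
    _ = grid.flatten.filter (fun v => v != 0) := by
        rw [List.filter_flatten, List.flatMap_def]

-- the arithmetic swap equals A's dict lookup when the two colours differ
lemma swapGet_eq (c1 c2 v : Int) (h : c1 ≠ c2) :
    pyA_swapGet c1 c2 v = (if v == c1 || v == c2 then c1 + c2 - v else v) := by
  unfold pyA_swapGet
  by_cases h1 : v = c1
  · subst h1
    have : PySem.Dict.getD ((PySem.Dict.empty.insert v c2).insert c2 v) v v = c2 := by
      simp [PySem.Dict.getD, PySem.Dict.insert, PySem.Dict.empty,
        PySem.Dict.get?_mk_cons, h]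
    rw [this]
    simp
  · by_cases h2 : v = c2
    · subst h2
      have : PySem.Dict.getD ((PySem.Dict.empty.insert c1 v).insert v c1) v v = c1 := by
        simp [PySem.Dict.getD, PySem.Dict.insert, PySem.Dict.empty,
          PySem.Dict.get?_mk_cons, h, Ne.symm h]
      rw [this]
      simp
    · have h1' : (c1 == v) = false := by simpa using Ne.symm h1
      have h2' : (c2 == v) = false := by simpa using Ne.symm h2
      simp [PySem.Dict.getD, PySem.Dict.insert, PySem.Dict.empty, PySem.Dict.get?,
        h, h1, h2, h1', h2', List.find?]

lemma map_pyRange_getD {α β : Type} (xs : List α) (d : α) (g : α → β) (a b : Nat)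
    (hb : b < xs.length) :
    (PySem.List.pyRange (a : Int) ((b : Int) + 1) 1).map (fun i => g (PySem.List.pyGetD xs i d))
      = ((xs.drop a).take (b + 1 - a)).map g := by
  apply List.ext_getElem
  · simp only [List.length_map, PySem.List.length_pyRange_one, List.length_take,
      List.length_drop]
    omega
  · intro i h1 h2
    simp only [List.length_map, PySem.List.length_pyRange_one] at h1
    rw [List.getElem_map, List.getElem_map, PySem.List.getElem_pyRange_one]
    rw [List.getElem_take, List.getElem_drop]
    congr 1
    have hcast : (a : Int) + (i : Int) = ((a + i : Nat) : Int) := by push_cast; ring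
    rw [hcast, PySem.List.pyGetD_natCast]
    rw [List.getD_eq_getElem _ _ (by omega)]

lemma row_idx_exists (row : List Int) :
    (∃ v ∈ row, v ≠ 0) ↔ ∃ c, c < row.length ∧ row.getD c 0 ≠ 0 := by
  constructor
  · rintro ⟨v, hv, hv0⟩
    obtain ⟨c, hc, rfl⟩ := List.mem_iff_getElem.mp hv
    exact ⟨c, hc, by rwa [List.getD_eq_getElem _ _ hc]⟩
  · rintro ⟨c, hc, hv⟩
    exact ⟨row.getD c 0, by rw [List.getD_eq_getElem _ _ hc]; exact List.getElem_mem _, hv⟩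

lemma fst_nonZero (grid : List (List Int))
    (hrect : ∀ row ∈ grid, row.length = (grid.headD []).length) (x : Int) :
    x ∈ (pyA_nonZero grid).map Prod.fst ↔ ∃ r : Nat, x = (r : Int) ∧ r ∈ nzRows grid := by
  simp only [List.mem_map]
  constructor
  · rintro ⟨p, hp, rfl⟩
    obtain ⟨r, c, rfl, hr, hc, hv⟩ := (mem_nonZero grid p).mp hp
    refine ⟨r, rfl, (mem_nzRows grid r).mpr ⟨hr, ?_⟩⟩
    have hrow : grid.getD r [] ∈ grid := by
      rw [List.getD_eq_getElem _ _ hr]; exact List.getElem_mem _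
    refine (row_idx_exists _).mpr ⟨c, ?_, hv⟩
    rw [hrect _ hrow]; exact hc
  · rintro ⟨r, rfl, hrs⟩
    obtain ⟨hr, hex⟩ := (mem_nzRows grid r).mp hrs
    have hrow : grid.getD r [] ∈ grid := by
      rw [List.getD_eq_getElem _ _ hr]; exact List.getElem_mem _
    obtain ⟨c, hc, hv⟩ := (row_idx_exists _).mp hex
    exact ⟨((r : Int), (c : Int)), (mem_nonZero grid _).mpr
      ⟨r, c, rfl, hr, by rw [← hrect _ hrow]; exact hc, hv⟩, rfl⟩

lemma snd_nonZero (grid : List (List Int)) (x : Int) :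
    x ∈ (pyA_nonZero grid).map Prod.snd ↔ ∃ c : Nat, x = (c : Int) ∧ c ∈ nzCols grid := by
  simp only [List.mem_map]
  constructor
  · rintro ⟨p, hp, rfl⟩
    obtain ⟨r, c, rfl, hr, hc, hv⟩ := (mem_nonZero grid p).mp hp
    refine ⟨c, rfl, (mem_nzCols grid c).mpr ⟨hc, grid.getD r [], ?_, hv⟩⟩
    rw [List.getD_eq_getElem _ _ hr]; exact List.getElem_mem _
  · rintro ⟨c, rfl, hcs⟩
    obtain ⟨hc, row, hrow, hv⟩ := (mem_nzCols grid c).mp hcs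
    obtain ⟨r, hr, hre⟩ := List.mem_iff_getElem.mp hrow
    refine ⟨((r : Int), (c : Int)), (mem_nonZero grid _).mpr ⟨r, c, rfl, hr, hc, ?_⟩, rfl⟩
    rw [List.getD_eq_getElem _ _ hr, hre]; exact hv

-- B's left margin is the first nonzero column
lemma left_eq (grid : List (List Int))
    (hrect : ∀ row ∈ grid, row.length = (grid.headD []).length)
    (hne : nzRows grid ≠ []) :
    (PySem.List.min?
        (((grid.drop ((nzRows grid).headD 0)).take
            ((nzRows grid).getLastD 0 + 1 - (nzRows grid).headD 0)).map leadZeros)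
        (fun x => x)).getD 0 = (nzCols grid).headD 0 := by
  set A := (nzRows grid).headD 0 with hAdef
  set B := (nzRows grid).getLastD 0 with hBdef
  set rows := (grid.drop A).take (B + 1 - A) with hrows
  set w := (grid.headD []).length with hw
  have hA : A ∈ nzRows grid := by
    cases h : nzRows grid with
    | nil => exact absurd h hne
    | cons a t => simp [hAdef, h]
  have hAB : A ≤ B := le_getLastD_of_pairwise _ (pairwise_nzRows grid) A hA 0
  have hB : B < grid.length := ((mem_nzRows grid B).mp (getLastD_mem _ _ hne)).1
  -- the first kept row has a nonzero entry
  have hgA : grid.getD A [] ∈ rows := mem_crop_of_nzRow grid hne A hA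
  obtain ⟨hAlen, vA, hvA, hvA0⟩ := (mem_nzRows grid A).mp hA
  have hgAg : grid.getD A [] ∈ grid := by
    rw [List.getD_eq_getElem _ _ hAlen]; exact List.getElem_mem _
  have hgAw : (grid.getD A []).length = w := hrect _ hgAg
  have hlzA : leadZeros (grid.getD A []) < w := by
    have hle := leadZeros_le (grid.getD A [])
    have hnee : leadZeros (grid.getD A []) ≠ (grid.getD A []).length := by
      intro he
      exact hvA0 ((leadZeros_eq_length_iff _).mp he vA hvA)
    omega
  have hLne : rows.map leadZeros ≠ [] := by
    simp only [ne_eq, List.map_eq_nil_iff]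
    exact List.ne_nil_of_mem hgA
  cases hmin : PySem.List.min? (rows.map leadZeros) (fun x => x) with
  | none => exact absurd ((PySem.List.min?_eq_none_iff _ _).mp hmin) hLne
  | some m =>
    obtain ⟨r0, hr0, hm⟩ := List.mem_map.mp (PySem.List.min?_mem hmin)
    have hmle : m ≤ leadZeros (grid.getD A []) :=
      PySem.List.min?_isMin hmin _ (List.mem_map_of_mem hgA)
    have hmw : m < w := by omega
    have hr0g : r0 ∈ grid := crop_mem_grid grid A B r0 hr0
    have hr0w : r0.length = w := hrect _ hr0g
    have hmnz : m ∈ nzCols grid := by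
      rw [mem_nzCols]
      refine ⟨hmw, r0, hr0g, ?_⟩
      rw [← hm]
      exact leadZeros_getD_ne r0 (by omega)
    have hmmin : ∀ c ∈ nzCols grid, m ≤ c := by
      intro c hc
      obtain ⟨hcw, row, hrowg, hrow0⟩ := (mem_nzCols grid c).mp hc
      obtain ⟨i, hi, hre⟩ := List.mem_iff_getElem.mp hrowg
      have hiR : i ∈ nzRows grid := by
        rw [mem_nzRows]
        refine ⟨hi, row.getD c 0, ?_, hrow0⟩
        rw [List.getD_eq_getElem grid [] hi, hre]
        rw [List.getD_eq_getElem row 0 (by rw [hrect row hrowg]; omega)]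
        exact List.getElem_mem _
      have hrowrows : row ∈ rows := by
        have := mem_crop_of_nzRow grid hne i hiR
        rwa [List.getD_eq_getElem grid [] hi, hre] at this
      have h1 : m ≤ leadZeros row :=
        PySem.List.min?_isMin hmin _ (List.mem_map_of_mem hrowrows)
      have h2 : leadZeros row ≤ c := leadZeros_le_of_getD_ne row c hrow0
      omega
    rw [Option.getD_some]
    exact (headD_eq_of_min _ (pairwise_nzCols grid) m hmnz hmmin 0).symm

-- B's right margin is width - 1 - the last nonzero column
lemma right_eq (grid : List (List Int))
    (hrect : ∀ row ∈ grid, row.length = (grid.headD []).length)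
    (hne : nzRows grid ≠ []) :
    (PySem.List.min?
        (((grid.drop ((nzRows grid).headD 0)).take
            ((nzRows grid).getLastD 0 + 1 - (nzRows grid).headD 0)).map
          (fun r => leadZeros r.reverse))
        (fun x => x)).getD 0 = (grid.headD []).length - 1 - (nzCols grid).getLastD 0 := by
  set A := (nzRows grid).headD 0 with hAdef
  set B := (nzRows grid).getLastD 0 with hBdef
  set rows := (grid.drop A).take (B + 1 - A) with hrows
  set w := (grid.headD []).length with hw
  set M := (nzCols grid).getLastD 0 with hMdef
  have hA : A ∈ nzRows grid := by
    cases h : nzRows grid with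
    | nil => exact absurd h hne
    | cons a t => simp [hAdef, h]
  have hgA : grid.getD A [] ∈ rows := mem_crop_of_nzRow grid hne A hA
  obtain ⟨hAlen, vA, hvA, hvA0⟩ := (mem_nzRows grid A).mp hA
  have hgAg : grid.getD A [] ∈ grid := by
    rw [List.getD_eq_getElem _ _ hAlen]; exact List.getElem_mem _
  have hgAw : (grid.getD A []).length = w := hrect _ hgAg
  have hlzA : leadZeros (grid.getD A []).reverse < w := by
    have hle := leadZeros_le (grid.getD A []).reverse
    rw [List.length_reverse, hgAw] at hle
    have hnee : leadZeros (grid.getD A []).reverse ≠ (grid.getD A []).reverse.length := by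
      intro he
      exact hvA0 ((leadZeros_eq_length_iff _).mp he vA (List.mem_reverse.mpr hvA))
    rw [List.length_reverse, hgAw] at hnee
    omega
  -- reverse getD bridge
  have hrev : ∀ (r : List Int), r.length = w → ∀ j, j < w →
      r.reverse.getD j 0 = r.getD (w - 1 - j) 0 := by
    intro r hrw j hj
    rw [List.getD_eq_getElem _ _ (by rw [List.length_reverse]; omega),
      List.getElem_reverse, List.getD_eq_getElem _ _ (by omega)]
    congr 1
    omega
  have hLne : rows.map (fun r => leadZeros r.reverse) ≠ [] := by
    simp only [ne_eq, List.map_eq_nil_iff]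
    exact List.ne_nil_of_mem hgA
  cases hmin : PySem.List.min? (rows.map (fun r => leadZeros r.reverse)) (fun x => x) with
  | none => exact absurd ((PySem.List.min?_eq_none_iff _ _).mp hmin) hLne
  | some m =>
    obtain ⟨r0, hr0, hm⟩ := List.mem_map.mp (PySem.List.min?_mem hmin)
    have hmle : m ≤ leadZeros (grid.getD A []).reverse :=
      PySem.List.min?_isMin hmin _ (List.mem_map_of_mem hgA)
    have hmw : m < w := by omega
    have hr0g : r0 ∈ grid := crop_mem_grid grid A B r0 hr0
    have hr0w : r0.length = w := hrect _ hr0g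
    -- w - 1 - m is a nonzero column
    have hmnz : w - 1 - m ∈ nzCols grid := by
      rw [mem_nzCols]
      refine ⟨by omega, r0, hr0g, ?_⟩
      rw [← hrev r0 hr0w m hmw, ← hm]
      exact leadZeros_getD_ne r0.reverse (by rw [List.length_reverse]; omega)
    have hle1 : w - 1 - m ≤ M :=
      le_getLastD_of_pairwise _ (pairwise_nzCols grid) _ hmnz 0
    -- and m ≤ w - 1 - M since column M is nonzero in some kept row
    have hM : M ∈ nzCols grid := getLastD_mem _ _ (List.ne_nil_of_mem hmnz)
    obtain ⟨hMw, row, hrowg, hrow0⟩ := (mem_nzCols grid M).mp hM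
    obtain ⟨i, hi, hre⟩ := List.mem_iff_getElem.mp hrowg
    have hiR : i ∈ nzRows grid := by
      rw [mem_nzRows]
      refine ⟨hi, row.getD M 0, ?_, hrow0⟩
      rw [List.getD_eq_getElem grid [] hi, hre]
      rw [List.getD_eq_getElem row 0 (by rw [hrect row hrowg]; omega)]
      exact List.getElem_mem _
    have hrowrows : row ∈ rows := by
      have := mem_crop_of_nzRow grid hne i hiR
      rwa [List.getD_eq_getElem grid [] hi, hre] at this
    have hroww : row.length = w := hrect _ hrowg
    have h1 : m ≤ leadZeros row.reverse :=
      PySem.List.min?_isMin hmin _ (List.mem_map_of_mem hrowrows)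
    have h2 : leadZeros row.reverse ≤ w - 1 - M := by
      apply leadZeros_le_of_getD_ne
      rw [hrev row hroww (w - 1 - M) (by omega)]
      rw [(by omega : w - 1 - (w - 1 - M) = M)]
      exact hrow0
    rw [Option.getD_some]
    omega

-- ===== VERDICT =====
theorem transform_spec : Claim_equal_transform := by
  intro grid _ hpre
  obtain ⟨hrect, hcard⟩ := hpre
  unfold Spec_transform transform transform_alt
  by_cases hg : grid = []
  · subst hg
    rfl
  · rw [if_neg hg]
    by_cases hrs : nzRows grid = []
    · -- no nonzero cell: both return []
      have hnz : pyA_nonZero grid = [] := by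
        rw [List.eq_nil_iff_forall_not_mem]
        intro x hx
        obtain ⟨r, c, rfl, hr, hc, hv⟩ := (mem_nonZero grid x).mp hx
        have hrowmem : grid.getD r [] ∈ grid := by
          rw [List.getD_eq_getElem _ _ hr]; exact List.getElem_mem _
        have hmem : r ∈ nzRows grid := (mem_nzRows grid r).mpr ⟨hr,
          (row_idx_exists _).mpr ⟨c, by rw [hrect _ hrowmem]; exact hc, hv⟩⟩
        rw [hrs] at hmem
        cases hmem
      rw [(rows_nil_iff grid).mpr hrs]
      simp [hnz]
    · -- the generic case
      set A := (nzRows grid).headD 0 with hAdef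
      set B := (nzRows grid).getLastD 0 with hBdef
      set w := (grid.headD []).length with hw
      set M := (nzCols grid).getLastD 0 with hMdef
      set rows := (grid.drop A).take (B + 1 - A) with hrowsdef
      have hcrop := rows_eq_crop grid hrs
      have hB : B < grid.length := ((mem_nzRows grid B).mp (getLastD_mem _ _ hrs)).1
      have hA : A ∈ nzRows grid := by
        cases h : nzRows grid with
        | nil => exact absurd h hrs
        | cons a t => simp [hAdef, h]
      have hAB : A ≤ B := le_getLastD_of_pairwise _ (pairwise_nzRows grid) A hA 0
      have hrowsne : rows ≠ [] := by
        have hlen : rows.length = B + 1 - A := crop_length grid A B hB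
        intro h
        rw [h] at hlen
        simp at hlen
        omega
      have hnzne : pyA_nonZero grid ≠ [] := by
        have hm : ((A : Int)) ∈ (pyA_nonZero grid).map Prod.fst :=
          (fst_nonZero grid hrect _).mpr ⟨A, rfl, hA⟩
        intro hnil; rw [hnil] at hm; simp at hm
      rw [if_neg hnzne, hcrop, if_neg hrowsne]
      -- colours agree
      have hAcol : PySem.Set.ofList ((pyA_nonZero grid).map (fun p =>
          PySem.List.pyGetD (PySem.List.pyGetD grid p.1 []) p.2 0)) =
          PySem.Set.ofList (grid.flatten.filter (fun v => v != 0)) := by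
        rw [coloursA_eq grid hrect]
      have hBcol : rows.foldl (fun s r =>
            r.foldl (fun s v => if v != 0 then PySem.Set.add s v else s) s) PySem.Set.empty =
          PySem.Set.ofList (grid.flatten.filter (fun v => v != 0)) := by
        rw [scanColours_eq, hrowsdef, filter_flatten_crop grid hrs]
      rw [hAcol, hBcol]
      have hlen2 : (PySem.Set.ofList (grid.flatten.filter (fun v => v != 0))).length = 2 := by
        rcases hcard with h0 | h2
        · exfalso
          obtain ⟨hAlen, vA, hvA, hvA0⟩ := (mem_nzRows grid A).mp hA
          have hvmem : vA ∈ grid.flatten := List.mem_flatten.mpr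
            ⟨grid.getD A [], by rw [List.getD_eq_getElem _ _ hAlen]; exact List.getElem_mem _, hvA⟩
          have hvs : vA ∈ PySem.Set.ofList (grid.flatten.filter (fun v => v != 0)) :=
            (PySem.Set.mem_ofList _ _).mpr (List.mem_filter.mpr ⟨hvmem, by simpa using hvA0⟩)
          rw [List.eq_nil_of_length_eq_zero h0] at hvs
          cases hvs
        · exact h2
      obtain ⟨c1, c2, hc12⟩ := List.length_eq_two.mp hlen2
      have hne12 : c1 ≠ c2 := by
        have hnd := PySem.Set.nodup_ofList (grid.flatten.filter (fun v => v != 0))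
        rw [hc12] at hnd
        simp only [List.nodup_cons, List.mem_singleton] at hnd
        exact hnd.1
      rw [if_pos hlen2, hc12]
      dsimp only
      -- A's min/max over the coordinate list are the head/last of the sorted index lists
      have hLfne : (pyA_nonZero grid).map Prod.fst ≠ [] := by simpa using hnzne
      have hLsne : (pyA_nonZero grid).map Prod.snd ≠ [] := by simpa using hnzne
      rw [min_eq_headD (nzRows grid) _ (pairwise_nzRows grid)
            (fun x hx => (fst_nonZero grid hrect x).mp hx)
            (fun r hr => (fst_nonZero grid hrect _).mpr ⟨r, rfl, hr⟩) hLfne,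
          max_eq_getLastD (nzRows grid) _ (pairwise_nzRows grid)
            (fun x hx => (fst_nonZero grid hrect x).mp hx)
            (fun r hr => (fst_nonZero grid hrect _).mpr ⟨r, rfl, hr⟩) hLfne,
          min_eq_headD (nzCols grid) _ (pairwise_nzCols grid)
            (fun x hx => (snd_nonZero grid x).mp hx)
            (fun c hc => (snd_nonZero grid _).mpr ⟨c, rfl, hc⟩) hLsne,
          max_eq_getLastD (nzCols grid) _ (pairwise_nzCols grid)
            (fun x hx => (snd_nonZero grid x).mp hx)
            (fun c hc => (snd_nonZero grid _).mpr ⟨c, rfl, hc⟩) hLsne]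
      -- B's margins
      rw [left_eq grid hrect hrs, right_eq grid hrect hrs]
      -- outer rows
      rw [map_pyRange_getD grid []
            (fun row => List.map
              (fun c => pyA_swapGet c1 c2 (PySem.List.pyGetD row c 0))
              (PySem.List.pyRange (((nzCols grid).headD 0 : Nat) : Int)
                ((((nzCols grid).getLastD 0 : Nat) : Int) + 1) 1))
            A B hB]
      apply List.map_congr_left
      intro row hrow'
      have hrowg : row ∈ grid := crop_mem_grid grid A B row hrow'
      have hroww : row.length = w := hrect _ hrowg
      have hM : M ∈ nzCols grid := by
        -- nzCols is nonempty because row A has a nonzero cell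
        obtain ⟨hAlen, vA, hvA, hvA0⟩ := (mem_nzRows grid A).mp hA
        have hgAg : grid.getD A [] ∈ grid := by
          rw [List.getD_eq_getElem _ _ hAlen]; exact List.getElem_mem _
        obtain ⟨c, hc, hv⟩ := (row_idx_exists _).mp ⟨vA, hvA, hvA0⟩
        have : c ∈ nzCols grid := (mem_nzCols grid c).mpr
          ⟨by have h' := hrect _ hgAg; show c < w; omega, grid.getD A [], hgAg, hv⟩
        exact getLastD_mem _ _ (List.ne_nil_of_mem this)
      have hMw : M < w := ((mem_nzCols grid M).mp hM).1
      rw [map_pyRange_getD row 0 (pyA_swapGet c1 c2)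
            ((nzCols grid).headD 0) M (by omega)]
      -- B's slice of this row
      have hcast : (row.length : Int) - ((w - 1 - M : Nat) : Int) = ((M + 1 : Nat) : Int) := by
        rw [hroww]
        omega
      rw [hcast, PySem.List.slice_natCast]
      apply List.map_congr_left
      intro v _
      exact swapGet_eq c1 c2 v hne12
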